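-- pv_equiv track=rewrite | github.com/mcyph/multi_translit | multi_translit/utils/ICUParser.py | get_variable_name
-- ===== SOURCE A (Python) =====
-- def get_variable_name(x, s):
--     """
--     Get the name of the variable
--
--     FIXME: Make it work with numbers etc after the variable! ===========================
--     """
--     out_list = []
--     allowed = 'abcdefghijklmnopqrstuvwxyz_'
--     allowed_set_1 = set(allowed+allowed.upper())
--     allowed_set_2 = allowed_set_1.union(set('1234567890_'))
--
--     first_time = False
--     while 1:
--         # Get the next character
--         try: c = s[x]
--         except IndexError: break
--
--         if first_time and c in allowed_set_1 and False:
--             out_list.append(c)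
--         elif c in allowed_set_2:
--             out_list.append(c)
--         else:
--             break
--
--         x += 1
--         first_time = False
--
--     assert out_list
--     return x, ''.join(out_list)
-- ===== SOURCE B (Python) =====
-- def get_variable_name(x, s):
--     t = s[x:]
--     end = next((i for i, c in enumerate(t)
--                 if not ('A' <= c <= 'Z' or 'a' <= c <= 'z' or '0' <= c <= '9' or c == '_')),
--                len(t))
--     g = t[:end]
--     assert g
--     return x + end, g
-- ===== Notes on version B (the rewrite author's own statement) =====
-- stated objective: simpler
-- what changed: Replaces A's try/except per-character cursor loop with an accumulator list by one slice s[x:] plus a find-first-non-identifier index and a prefix slice (no accumulator, no exception-driven loop exit).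
-- intended difference: On negative in-range x whose suffix s[x:] is all identifier characters and whose first character s[0] is also an identifier character, A's cursor wraps past -1 to 0 and rescans from the front, returning the suffix with a fresh front run glued on, while B returns just the identifier run starting at position x, the intended reading of 'scan the name starting at position x'. — e.g. on get_variable_name(-1, "_a"): A returns (2, "a_a"), B returns (0, "a")
import Mathlib
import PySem

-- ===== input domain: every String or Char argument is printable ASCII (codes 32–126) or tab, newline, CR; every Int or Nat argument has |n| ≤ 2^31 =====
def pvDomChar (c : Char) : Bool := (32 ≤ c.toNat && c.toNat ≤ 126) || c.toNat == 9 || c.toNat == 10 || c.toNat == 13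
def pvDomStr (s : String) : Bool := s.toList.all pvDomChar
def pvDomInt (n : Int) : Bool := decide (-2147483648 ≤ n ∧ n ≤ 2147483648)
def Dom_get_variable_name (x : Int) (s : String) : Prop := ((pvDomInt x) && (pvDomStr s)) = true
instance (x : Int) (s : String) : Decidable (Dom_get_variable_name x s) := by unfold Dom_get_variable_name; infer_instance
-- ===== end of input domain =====

-- B replaces A's char-by-char try/except scan loop with one slice plus a find-first-bad-index,
-- and on negative in-range x returns the identifier run of the suffix instead of A's wrap-around
-- rescan (see D_ below).

-- ===== PORT A =====
def pvAllowedStr : List Char := "abcdefghijklmnopqrstuvwxyz_".toList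
def pvAllowedSet1 : PySem.Set Char := PySem.Set.ofList (pvAllowedStr ++ PySem.Chars.upper pvAllowedStr)
def pvAllowedSet2 : PySem.Set Char := PySem.Set.union pvAllowedSet1 (PySem.Set.ofList "1234567890_".toList)

def pvLoopA (s : List Char) (x : Int) (firstTime : Bool) (out : List Char) : Int × List Char :=
  match h : PySem.List.pyGet? s x with
  | none => (x, out)
  | some c =>
    if firstTime && PySem.Set.contains pvAllowedSet1 c && false then
      pvLoopA s (x + 1) false (out ++ [c])
    else if PySem.Set.contains pvAllowedSet2 c then
      pvLoopA s (x + 1) false (out ++ [c])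
    else (x, out)
termination_by ((s.length : Int) - x).toNat
decreasing_by
  all_goals
    have h2 : ¬ (PySem.List.pyGet? s x = none) := by simp [h]
    rw [PySem.List.pyGet?_eq_none_iff, not_not] at h2
    unfold PySem.Raise.InRange at h2
    omega

def get_variable_name (x : Int) (s : String) : Int × String :=
  let r := pvLoopA s.toList x false []
  (r.1, String.ofList r.2)

-- ===== PORT B =====
def pvIdentB (c : Char) : Bool :=
  ('A' ≤ c && c ≤ 'Z') || ('a' ≤ c && c ≤ 'z') || ('0' ≤ c && c ≤ '9') || c == '_'

def get_variable_name_alt (x : Int) (s : String) : Int × String :=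
  let t := PySem.List.slice s.toList (some x) none
  let e := t.findIdx (fun c => !pvIdentB c)
  (x + (e : Int), String.ofList (t.take e))

-- ===== PRECONDITION & SPEC =====

-- Pre_ excludes exactly the inputs on which A raises (an out-of-range start position or a
-- non-identifier character at the start make out_list empty, so `assert out_list` fails).
def Pre_get_variable_name (x : Int) (s : String) : Prop :=
  Option.map (fun c => c.isAlphanum || c == '_') (PySem.List.pyGet? s.toList x) = some true
instance (x : Int) (s : String) : Decidable (Pre_get_variable_name x s) := by
  unfold Pre_get_variable_name; infer_instance
def pvWitness_get_variable_name : Int × String := (0, "a")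

-- On negative in-range x whose suffix s[x:] consists only of identifier characters and whose
-- s[0] is an identifier character, A's cursor wraps past -1 to 0 and rescans from the front
-- (returning the suffix with a fresh front run glued on), while B returns just the identifier
-- run starting at position x — the intended reading of "scan the name starting at x".
def D_get_variable_name (x : Int) (s : String) : Prop :=
  x < 0 ∧ 0 ≤ x + (s.toList.length : Int) ∧
  (s.toList.headD ' ' :: s.toList.drop (x + (s.toList.length : Int)).toNat).all
    (fun c => c.isAlphanum || c == '_') = true
instance (x : Int) (s : String) : Decidable (D_get_variable_name x s) := by
  unfold D_get_variable_name; infer_instance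

def Spec_get_variable_name (x : Int) (s : String) (out : Int × String) : Prop :=
  ¬ D_get_variable_name x s → out = get_variable_name_alt x s
instance (x : Int) (s : String) (out : Int × String) : Decidable (Spec_get_variable_name x s out) := by
  unfold Spec_get_variable_name; infer_instance

def pvDiffWitness_get_variable_name : Int × String := (-1, "_a")
def pvDiffWitnessOut_get_variable_name : (Int × String) × (Int × String) := ((2, "a_a"), (0, "a"))

-- ===== CLAIM (what is proved, stated in full; the proofs are below) =====
def Claim_unchanged_get_variable_name : Prop := ∀ (x : Int) (s : String), Dom_get_variable_name x s → Pre_get_variable_name x s → Spec_get_variable_name x s (get_variable_name x s)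
def Claim_changed_get_variable_name : Prop := Dom_get_variable_name (pvDiffWitness_get_variable_name.1) (pvDiffWitness_get_variable_name.2) ∧ Pre_get_variable_name (pvDiffWitness_get_variable_name.1) (pvDiffWitness_get_variable_name.2) ∧ D_get_variable_name (pvDiffWitness_get_variable_name.1) (pvDiffWitness_get_variable_name.2) ∧ get_variable_name (pvDiffWitness_get_variable_name.1) (pvDiffWitness_get_variable_name.2) = pvDiffWitnessOut_get_variable_name.1 ∧ get_variable_name_alt (pvDiffWitness_get_variable_name.1) (pvDiffWitness_get_variable_name.2) = pvDiffWitnessOut_get_variable_name.2 ∧ pvDiffWitnessOut_get_variable_name.1 ≠ pvDiffWitnessOut_get_variable_name.2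
def Claim_exact_get_variable_name : Prop := ∀ (x : Int) (s : String), Dom_get_variable_name x s → Pre_get_variable_name x s → D_get_variable_name x s → get_variable_name x s ≠ get_variable_name_alt x s

-- ===== LEMMAS AND PROOFS =====

-- A's allowed_set_2 membership agrees with B's character-class test on every ASCII character.
set_option maxRecDepth 4000 in
lemma pvBridge (c : Char) (h : c.toNat < 128) :
    PySem.Set.contains pvAllowedSet2 c = pvIdentB c := by
  have key : ∀ n : Fin 128,
      PySem.Set.contains pvAllowedSet2 (Char.ofNat n.val) = pvIdentB (Char.ofNat n.val) := by decide
  have := key ⟨c.toNat, h⟩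
  rwa [Char.ofNat_toNat] at this

-- the code-point test of Pre_/D_ agrees with B's character-class test
lemma pvIdentAlnum : (fun c => c.isAlphanum || c == '_') = pvIdentB := by
  funext c
  unfold pvIdentB
  simp only [Char.isAlphanum, Char.isAlpha, Char.isDigit, Char.isUpper, Char.isLower]
  rw [Bool.eq_iff_iff]
  simp only [Bool.or_eq_true, Bool.and_eq_true, decide_eq_true_eq, beq_iff_eq]
  tauto

lemma pvFindIdxLen (l : List Char) :
    l.findIdx (fun c => !pvIdentB c) = (l.takeWhile pvIdentB).length := by
  rw [List.takeWhile_eq_take_findIdx_not, List.length_take]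
  exact (Nat.min_eq_left List.findIdx_le_length).symm

-- B's port, rewritten through the takeWhile/findIdx correspondence.
lemma pvAltEq (x : Int) (s : String) :
    get_variable_name_alt x s =
      (x + (((PySem.List.slice s.toList (some x) none).takeWhile pvIdentB).length : Int),
        String.ofList ((PySem.List.slice s.toList (some x) none).takeWhile pvIdentB)) := by
  show (x + ((PySem.List.slice s.toList (some x) none).findIdx (fun c => !pvIdentB c) : Int),
      String.ofList ((PySem.List.slice s.toList (some x) none).take
        ((PySem.List.slice s.toList (some x) none).findIdx (fun c => !pvIdentB c)))) = _
  rw [← List.takeWhile_eq_take_findIdx_not, pvFindIdxLen]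

-- characterization of A's loop for a nonnegative cursor
lemma pvLoopA_nonneg (l : List Char) (h128 : ∀ c ∈ l, c.toNat < 128) :
    ∀ (n : Nat) (x : Int) (out : List Char), 0 ≤ x → l.length - x.toNat = n →
    pvLoopA l x false out =
      (x + (((l.drop x.toNat).takeWhile pvIdentB).length : Int),
        out ++ (l.drop x.toNat).takeWhile pvIdentB) := by
  intro n
  induction n using Nat.strong_induction_on with
  | _ n ih =>
    intro x out hx hn
    rw [pvLoopA.eq_def]
    by_cases hlt : x.toNat < l.length
    · have hxl : x < (l.length : Int) := by omega
      rw [PySem.List.pyGet?_eq_some_getElem l hx hxl]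
      have hbr : PySem.Set.contains pvAllowedSet2 l[x.toNat] = pvIdentB l[x.toNat] :=
        pvBridge _ (h128 _ (l.getElem_mem _))
      have hdrop : l.drop x.toNat = l[x.toNat] :: l.drop (x.toNat + 1) := List.drop_eq_getElem_cons hlt
      simp only [Bool.false_and, Bool.and_false, Bool.false_eq_true, if_false, hbr]
      by_cases hid : pvIdentB l[x.toNat] = true
      · rw [if_pos hid]
        have h1n : l.length - (x + 1).toNat < n := by omega
        rw [ih _ h1n (x + 1) (out ++ [l[x.toNat]]) (by omega) rfl]
        have hsucc : (x + 1).toNat = x.toNat + 1 := by omega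
        rw [hsucc, hdrop, List.takeWhile_cons_of_pos hid]
        simp [Prod.mk.injEq, List.append_assoc]
        ring
      · rw [if_neg hid]
        rw [hdrop, List.takeWhile_cons_of_neg (by simpa using hid)]
        simp
    · have hnone : PySem.List.pyGet? l x = none := by
        rw [PySem.List.pyGet?_eq_none_iff]; unfold PySem.Raise.InRange; omega
      rw [hnone]
      have hnil : l.drop x.toNat = [] := List.drop_eq_nil_of_le (by omega)
      simp [hnil]

-- characterization of A's loop for a negative in-range cursor
lemma pvLoopA_neg (l : List Char) (h128 : ∀ c ∈ l, c.toNat < 128) :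
    ∀ (n : Nat) (x : Int) (out : List Char), -(l.length : Int) ≤ x → x < 0 → (-x).toNat = n →
    pvLoopA l x false out =
      (if (l.drop (x + (l.length : Int)).toNat).all pvIdentB then
        pvLoopA l 0 false (out ++ l.drop (x + (l.length : Int)).toNat)
      else
        (x + (((l.drop (x + (l.length : Int)).toNat).takeWhile pvIdentB).length : Int),
          out ++ (l.drop (x + (l.length : Int)).toNat).takeWhile pvIdentB)) := by
  intro n
  induction n using Nat.strong_induction_on with
  | _ n ih =>
    intro x out hlo hneg hn
    have hk : x = -(((-x).toNat : Nat) : Int) := by omega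
    have hkpos : 0 < (-x).toNat := by omega
    have hkle : (-x).toNat ≤ l.length := by omega
    set p : Nat := (x + (l.length : Int)).toNat with hp
    have hpl : p < l.length := by omega
    have hpk : l.length - (-x).toNat = p := by omega
    have hsome : PySem.List.pyGet? l x = some l[p] := by
      rw [hk, PySem.List.pyGet?_neg_natCast l _ hkpos hkle, hpk]
      exact List.getElem?_eq_getElem hpl
    rw [pvLoopA.eq_def, hsome]
    have hbr : PySem.Set.contains pvAllowedSet2 l[p] = pvIdentB l[p] :=
      pvBridge _ (h128 _ (l.getElem_mem _))
    have hdrop : l.drop p = l[p] :: l.drop (p + 1) := List.drop_eq_getElem_cons hpl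
    simp only [Bool.false_and, Bool.and_false, Bool.false_eq_true, if_false, hbr]
    by_cases hid : pvIdentB l[p] = true
    · rw [if_pos hid]
      by_cases hx1 : x + 1 = 0
      · have hp1 : p + 1 = l.length := by omega
        have htail : l.drop (p + 1) = [] := by rw [hp1]; exact List.drop_length
        rw [hdrop, htail]
        simp [hid, hx1]
      · have hmeas : (-(x + 1)).toNat < n := by omega
        rw [ih _ hmeas (x + 1) (out ++ [l[p]]) (by omega) (by omega) rfl]
        have hp1 : (x + 1 + (l.length : Int)).toNat = p + 1 := by omega
        rw [hp1, hdrop]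
        simp only [List.all_cons, hid, Bool.true_and, List.takeWhile_cons_of_pos hid]
        split_ifs with hall
        · simp [List.append_assoc]
        · simp [Prod.mk.injEq, List.append_assoc]
          ring
    · rw [if_neg hid]
      rw [hdrop]
      simp only [List.all_cons, hid, Bool.false_and, List.takeWhile_cons_of_neg (by simpa using hid)]
      simp

-- Dom gives the ASCII bound pvBridge needs.
lemma pvAsciiChars (x : Int) (s : String) (hdom : Dom_get_variable_name x s) :
    ∀ c ∈ s.toList, c.toNat < 128 := by
  unfold Dom_get_variable_name pvDomStr pvDomChar at hdom
  simp only [Bool.and_eq_true, List.all_eq_true] at hdom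
  intro c hc
  have := hdom.2 c hc
  simp only [Bool.or_eq_true, Bool.and_eq_true, decide_eq_true_eq, beq_iff_eq] at this
  omega

-- the slice s[x:] for a negative in-range x
lemma pvSliceNeg (l : List Char) (x : Int) (hlo : -(l.length : Int) ≤ x) (hneg : x < 0) :
    PySem.List.slice l (some x) none = l.drop (x + (l.length : Int)).toNat := by
  have hk : x = -(((-x).toNat : Nat) : Int) := by omega
  have hkpos : 0 < (-x).toNat := by omega
  rw [hk, PySem.List.slice_from_neg_natCast l _ hkpos]
  congr 1
  omega

theorem get_variable_name_spec : Claim_unchanged_get_variable_name := by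
  intro x s hdom hpre
  unfold Spec_get_variable_name
  intro hnd
  have h128 := pvAsciiChars x s hdom
  unfold Pre_get_variable_name at hpre
  rw [pvAltEq]
  unfold get_variable_name
  by_cases hx : 0 ≤ x
  · rw [pvLoopA_nonneg s.toList h128 _ x [] hx rfl, PySem.List.slice_from s.toList hx]
    simp
  · have hx' : x < 0 := by omega
    -- Pre_ forces x in range
    have hlo : -(s.toList.length : Int) ≤ x := by
      by_contra hcon
      have : PySem.List.pyGet? s.toList x = none := by
        rw [PySem.List.pyGet?_eq_none_iff]; unfold PySem.Raise.InRange; omega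
      rw [this] at hpre
      simp at hpre
    rw [pvLoopA_neg s.toList h128 _ x [] hlo hx' rfl, pvSliceNeg s.toList x hlo hx']
    set suf : List Char := s.toList.drop (x + (s.toList.length : Int)).toNat with hsuf
    by_cases hall : suf.all pvIdentB = true
    · -- ¬ D_ forces a non-identifier first character of s
      have hlen1 : 1 ≤ s.toList.length := by omega
      obtain ⟨c0, tl, hl⟩ : ∃ c0 tl, s.toList = c0 :: tl := by
        cases hls : s.toList with
        | nil => rw [hls] at hlen1; simp at hlen1
        | cons a b => exact ⟨a, b, rfl⟩
      have hhead : pvIdentB (s.toList.headD ' ') = false := by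
        unfold D_get_variable_name at hnd
        push Not at hnd
        have hno := hnd hx' (by omega)
        rw [pvIdentAlnum, List.all_cons, ← hsuf, hall] at hno
        simpa using hno
      rw [if_pos hall]
      rw [pvLoopA_nonneg s.toList h128 _ 0 ([] ++ suf) le_rfl rfl]
      have htw : s.toList.takeWhile pvIdentB = [] := by
        rw [hl] at hhead ⊢
        simp only [List.headD_cons] at hhead
        exact List.takeWhile_cons_of_neg (by simp [hhead])
      have htwsuf : suf.takeWhile pvIdentB = suf :=
        List.takeWhile_eq_self_iff.mpr (by simpa using (List.all_eq_true.mp hall))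
      have hsuflen : suf.length = s.toList.length - (x + (s.toList.length : Int)).toNat := by
        rw [hsuf]; exact List.length_drop
      simp only [Int.toNat_zero, List.drop_zero, htw, htwsuf]
      simp only [Prod.mk.injEq]
      constructor
      · simp; omega
      · simp
    · rw [if_neg hall]
      simp

-- single-step unfoldings of A's loop, for evaluating it at the difference witness
lemma pvStep (l : List Char) (x : Int) (out : List Char) (c : Char)
    (hg : PySem.List.pyGet? l x = some c)
    (hc : PySem.Set.contains pvAllowedSet2 c = true) :
    pvLoopA l x false out = pvLoopA l (x + 1) false (out ++ [c]) := by
  rw [pvLoopA.eq_def, hg]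
  simp only [Bool.false_and, Bool.and_false, Bool.false_eq_true, if_false]
  rw [if_pos hc]

lemma pvStop (l : List Char) (x : Int) (out : List Char)
    (hg : PySem.List.pyGet? l x = none) :
    pvLoopA l x false out = (x, out) := by
  rw [pvLoopA.eq_def, hg]

set_option maxRecDepth 4000 in
theorem get_variable_name_changed : Claim_changed_get_variable_name := by
  unfold Claim_changed_get_variable_name
  refine ⟨by decide, by decide, by decide, ?_, by decide, by decide⟩
  have hA : pvLoopA ("_a" : String).toList (-1) false [] = (2, ['a', '_', 'a']) := by
    rw [pvStep ("_a" : String).toList (-1) [] 'a' (by decide) (by decide)]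
    norm_num
    rw [pvStep ("_a" : String).toList 0 ['a'] '_' (by decide) (by decide)]
    norm_num
    rw [pvStep ("_a" : String).toList 1 ['a', '_'] 'a' (by decide) (by decide)]
    norm_num
    rw [pvStop ("_a" : String).toList 2 ['a', '_', 'a'] (by decide)]
  show ((pvLoopA ("_a" : String).toList (-1) false []).1,
    String.ofList (pvLoopA ("_a" : String).toList (-1) false []).2) = (2, "a_a")
  rw [hA]

theorem get_variable_name_tight : Claim_exact_get_variable_name := by
  intro x s hdom hpre hd
  have h128 := pvAsciiChars x s hdom
  unfold D_get_variable_name at hd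
  obtain ⟨hx, hge, hcons⟩ := hd
  rw [pvIdentAlnum, List.all_cons, Bool.and_eq_true] at hcons
  obtain ⟨hhead, hall⟩ := hcons
  have hlo : -(s.toList.length : Int) ≤ x := by omega
  have hlen1 : 1 ≤ s.toList.length := by omega
  obtain ⟨c0, tl, hl⟩ : ∃ c0 tl, s.toList = c0 :: tl := by
    cases hls : s.toList with
    | nil => rw [hls] at hlen1; simp at hlen1
    | cons a b => exact ⟨a, b, rfl⟩
  intro heq
  have heq1 := congrArg Prod.fst heq
  rw [pvAltEq] at heq1
  unfold get_variable_name at heq1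
  rw [pvLoopA_neg s.toList h128 _ x [] hlo hx rfl, if_pos hall] at heq1
  rw [pvLoopA_nonneg s.toList h128 _ 0 _ le_rfl rfl] at heq1
  rw [pvSliceNeg s.toList x hlo hx] at heq1
  set suf : List Char := s.toList.drop (x + (s.toList.length : Int)).toNat with hsuf
  have htwsuf : suf.takeWhile pvIdentB = suf :=
    List.takeWhile_eq_self_iff.mpr (by simpa using (List.all_eq_true.mp hall))
  have hsuflen : suf.length = s.toList.length - (x + (s.toList.length : Int)).toNat := by
    rw [hsuf]; exact List.length_drop
  have htw : s.toList.takeWhile pvIdentB = c0 :: tl.takeWhile pvIdentB := by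
    rw [hl]
    exact List.takeWhile_cons_of_pos (by rw [hl] at hhead; simpa using hhead)
  simp only [Int.toNat_zero, List.drop_zero, htw, htwsuf, List.length_cons] at heq1
  simp at heq1
  omega
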